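-- pv_equiv track=rewrite | github.com/SG029/CO-project | Simulator.py | dec_to_two_unsigned_to_dec
-- ===== SOURCE A (Python) =====
-- def dec_to_two_unsigned_to_dec(dec):
--     num_bits=32
--     if dec>=0:bina=bin(dec)[2:].zfill(num_bits)
--     else:
--         pos_bina = bin(abs(dec))[2:].zfill(num_bits)
--         inv_bina = ''.join('1' if bit =='0' else '0' for bit in pos_bina)
--         bina = bin(int(inv_bina, 2) + 1)[2:].zfill(num_bits)
--     deci = 0
--     deci = int(bina, 2)
--     return deci
-- ===== SOURCE B (Python) =====
-- def dec_to_two_unsigned_to_dec(dec):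
--     if dec >= 0:
--         return dec
--     m = -dec
--     n = max(32, m.bit_length())
--     return (1 << n) - m
-- ===== Notes on version B (the rewrite author's own statement) =====
-- stated objective: simpler
-- what changed: Replaces the bin()/zfill/string-inversion/int(...,2) pipeline with a closed-form arithmetic two's complement: dec for dec>=0, else 2**max(32, bit_length(-dec)) - (-dec).
import Mathlib
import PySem

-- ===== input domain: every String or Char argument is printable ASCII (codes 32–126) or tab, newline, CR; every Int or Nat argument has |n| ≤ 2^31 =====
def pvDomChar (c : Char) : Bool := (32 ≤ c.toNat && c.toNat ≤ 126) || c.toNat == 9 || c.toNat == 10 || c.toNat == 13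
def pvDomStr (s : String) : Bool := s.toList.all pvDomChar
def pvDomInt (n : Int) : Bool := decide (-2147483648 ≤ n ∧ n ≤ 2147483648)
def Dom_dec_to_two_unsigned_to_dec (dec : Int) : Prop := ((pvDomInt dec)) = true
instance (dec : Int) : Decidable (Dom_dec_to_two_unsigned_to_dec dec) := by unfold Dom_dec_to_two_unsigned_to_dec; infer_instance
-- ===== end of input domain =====

-- B replaces A's bin()/zfill/string-inversion/int(...,2) pipeline with closed-form arithmetic (objective: simpler).

-- ===== PORT A =====
-- bin(n)[2:] for n > 0 (most-significant bit first); exact hand port of Python's binary repr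
def pvBinGo : Nat → List Char
  | 0 => []
  | n + 1 => pvBinGo ((n + 1) / 2) ++ [if (n + 1) % 2 = 1 then '1' else '0']
decreasing_by exact Nat.div_lt_self (Nat.succ_pos n) (by omega)

-- bin(n)[2:] including bin(0)[2:] = "0"
def pvBinRepr (n : Nat) : List Char := if n = 0 then ['0'] else pvBinGo n

-- s.zfill(k): left-pad with '0' to length k
def pvZfill (k : Nat) (s : List Char) : List Char := List.replicate (k - s.length) '0' ++ s

-- int(s, 2) on a string of '0'/'1' characters (exact there)
def pvParseBin (s : List Char) : Nat := s.foldl (fun a c => 2 * a + (if c = '1' then 1 else 0)) 0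

def dec_to_two_unsigned_to_dec (dec : Int) : Int :=
  let num_bits := 32
  let bina : List Char :=
    if dec ≥ 0 then pvZfill num_bits (pvBinRepr dec.toNat)
    else
      let pos_bina := pvZfill num_bits (pvBinRepr dec.natAbs)
      let inv_bina := pos_bina.map (fun bit => if bit = '0' then '1' else '0')
      pvZfill num_bits (pvBinRepr (pvParseBin inv_bina + 1))
  let deci : Int := (pvParseBin bina : Int)
  deci

-- ===== PORT B =====
def dec_to_two_unsigned_to_dec_alt (dec : Int) : Int :=
  if dec ≥ 0 then dec
  else
    let m := (-dec).toNat
    let n := max 32 m.size   -- m.bit_length() = Nat.size m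
    ((1 <<< n : Nat) : Int) - (m : Int)

-- ===== PRECONDITION & SPEC =====
def Spec_dec_to_two_unsigned_to_dec (dec : Int) (out : Int) : Prop := out = dec_to_two_unsigned_to_dec_alt dec
instance (dec : Int) (out : Int) : Decidable (Spec_dec_to_two_unsigned_to_dec dec out) := by unfold Spec_dec_to_two_unsigned_to_dec; infer_instance

-- ===== CLAIM (what is proved, stated in full; the proofs are below) =====
def Claim_equal_dec_to_two_unsigned_to_dec : Prop := ∀ (dec : Int), Dom_dec_to_two_unsigned_to_dec dec → Spec_dec_to_two_unsigned_to_dec dec (dec_to_two_unsigned_to_dec dec)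

-- ===== LEMMAS AND PROOFS =====

theorem pvParseBin_append (s t : List Char) :
    pvParseBin (s ++ t) = t.foldl (fun a c => 2 * a + (if c = '1' then 1 else 0)) (pvParseBin s) := by
  simp [pvParseBin, List.foldl_append]

theorem pvParseBin_snoc (s : List Char) (c : Char) :
    pvParseBin (s ++ [c]) = 2 * pvParseBin s + (if c = '1' then 1 else 0) := by
  simp [pvParseBin_append, List.foldl]

theorem pvParseBin_replicate_zero (k : Nat) (s : List Char) :
    pvParseBin (List.replicate k '0' ++ s) = pvParseBin s := by
  induction k with
  | zero => simp
  | succ k ih =>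
      have h : List.replicate (k + 1) '0' ++ s = '0' :: (List.replicate k '0' ++ s) := by
        simp [List.replicate_succ]
      rw [h]
      have h2 : pvParseBin ('0' :: (List.replicate k '0' ++ s)) = pvParseBin (List.replicate k '0' ++ s) := by
        simp [pvParseBin, List.foldl]
      rw [h2, ih]

theorem pvParseBin_binGo (n : Nat) : pvParseBin (pvBinGo n) = n := by
  induction n using Nat.strong_induction_on with
  | _ n ih =>
    match n with
    | 0 => simp [pvBinGo, pvParseBin]
    | m + 1 =>
      rw [pvBinGo, pvParseBin_snoc, ih ((m + 1) / 2) (Nat.div_lt_self (Nat.succ_pos m) (by omega))]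
      by_cases h : (m + 1) % 2 = 1 <;> simp [h] <;> omega

theorem pvParseBin_binRepr (n : Nat) : pvParseBin (pvBinRepr n) = n := by
  unfold pvBinRepr
  split
  · simp [pvParseBin, List.foldl]; omega
  · exact pvParseBin_binGo n

theorem pvBinGo_len (k : Nat) : ∀ n, n < 2 ^ k → (pvBinGo n).length ≤ k := by
  induction k with
  | zero =>
      intro n hn
      interval_cases n
      simp [pvBinGo]
  | succ k ih =>
      intro n hn
      match n with
      | 0 => simp [pvBinGo]
      | m + 1 =>
        rw [pvBinGo]
        have := ih ((m + 1) / 2) (by omega)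
        simp only [List.length_append, List.length_singleton]
        omega

theorem pvBinRepr_len (n : Nat) (h : n < 2 ^ 32) : (pvBinRepr n).length ≤ 32 := by
  unfold pvBinRepr
  split
  · simp
  · exact pvBinGo_len 32 n h

theorem pvBinGo_chars (n : Nat) : ∀ c ∈ pvBinGo n, c = '0' ∨ c = '1' := by
  induction n using Nat.strong_induction_on with
  | _ n ih =>
    match n with
    | 0 => simp [pvBinGo]
    | m + 1 =>
      rw [pvBinGo]
      intro c hc
      rcases List.mem_append.1 hc with h | h
      · exact ih ((m + 1) / 2) (Nat.div_lt_self (Nat.succ_pos m) (by omega)) c h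
      · simp at h; split at h <;> simp [h]

theorem pvParseBin_invert (s : List Char) (hs : ∀ c ∈ s, c = '0' ∨ c = '1') :
    pvParseBin (s.map (fun bit => if bit = '0' then '1' else '0')) + pvParseBin s + 1 = 2 ^ s.length := by
  induction s using List.reverseRecOn with
  | nil => simp [pvParseBin]
  | append_singleton s c ih =>
      have hc := hs c (by simp)
      have hs' : ∀ c ∈ s, c = '0' ∨ c = '1' := fun x hx => hs x (by simp [hx])
      rw [List.map_append, List.map_singleton, pvParseBin_snoc, pvParseBin_snoc]
      have := ih hs'
      rcases hc with h | h <;> subst h <;> simp <;> ring_nf <;> omega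

-- ===== VERDICT (by name: the statement is the Claim_ definition above) =====
theorem dec_to_two_unsigned_to_dec_spec : Claim_equal_dec_to_two_unsigned_to_dec := by
  intro dec hdom
  unfold Spec_dec_to_two_unsigned_to_dec dec_to_two_unsigned_to_dec dec_to_two_unsigned_to_dec_alt
  by_cases hpos : dec ≥ 0
  · simp only [hpos, if_pos]
    simp [pvZfill, pvParseBin_replicate_zero, pvParseBin_binRepr, Int.toNat_of_nonneg hpos]
  · simp only [hpos, if_false]
    have hneg : dec < 0 := by omega
    have hdom' : -2147483648 ≤ dec ∧ dec ≤ 2147483648 := by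
      simpa [Dom_dec_to_two_unsigned_to_dec, pvDomInt] using hdom
    set m := dec.natAbs with hm
    have hmeq : (-dec).toNat = m := by omega
    have hm1 : 1 ≤ m := by omega
    have hm31 : m ≤ 2 ^ 31 := by
      have : (m : Int) = -dec := by omega
      omega
    have hm32 : m < 2 ^ 32 := by omega
    -- A's value
    have hlenR : (pvBinRepr m).length ≤ 32 := pvBinRepr_len m hm32
    have hlenPos : (pvZfill 32 (pvBinRepr m)).length = 32 := by
      simp [pvZfill]; omega
    have hchars : ∀ c ∈ pvZfill 32 (pvBinRepr m), c = '0' ∨ c = '1' := by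
      intro c hc
      rcases List.mem_append.1 hc with h | h
      · left; exact List.eq_of_mem_replicate h
      · unfold pvBinRepr at h
        split at h
        · simp at h; simp [h]
        · exact pvBinGo_chars m c h
    have hposval : pvParseBin (pvZfill 32 (pvBinRepr m)) = m := by
      simp [pvZfill, pvParseBin_replicate_zero, pvParseBin_binRepr]
    have hinv := pvParseBin_invert _ hchars
    rw [hposval, hlenPos] at hinv
    have hinvval : pvParseBin ((pvZfill 32 (pvBinRepr m)).map (fun bit => if bit = '0' then '1' else '0')) + 1 = 2 ^ 32 - m := by omega
    rw [hinvval]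
    have hAval : pvParseBin (pvZfill 32 (pvBinRepr (2 ^ 32 - m))) = 2 ^ 32 - m := by
      simp [pvZfill, pvParseBin_replicate_zero, pvParseBin_binRepr]
    rw [hAval]
    -- B's value
    have hsize : m.size ≤ 32 := Nat.size_le.2 hm32
    have hn : max 32 m.size = 32 := by omega
    rw [hmeq, hn]
    have : (1 <<< 32 : Nat) = 2 ^ 32 := by decide
    rw [this]
    omega
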